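-- pv_equiv track=rewrite | github.com/aexachao/nas-subtitle-manager | utils/lang_detection.py | detect_language_from_filename
-- ===== SOURCE A (Python) =====
-- def detect_language_from_filename(filename: str) -> str:
--     """
--     从文件名检测语言
--
--     Args:
--         filename: 文件名
--
--     Returns:
--         语言代码（zh/chs/cht/en/ja/ko/unknown）
--     """
--     filename_lower = filename.lower()
--
--     # 检查常见语言代码
--     lang_codes = {
--         'chs': 'chs',
--         'cht': 'cht',
--         'eng': 'en',
--         'jpn': 'ja',
--         'kor': 'ko',
--         'zh': 'chs',
--         'en': 'en',
--         'ja': 'ja',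
--         'ko': 'ko',
--     }
--
--     for code, lang in lang_codes.items():
--         # 检查 .code. 或 .code 结尾
--         if f".{code}." in filename_lower or filename_lower.endswith(f".{code}"):
--             return lang
--
--     return 'unknown'
-- ===== SOURCE B (Python) =====
-- def detect_language_from_filename(filename: str) -> str:
--     """Single-pass tokenizer + set membership: collect every dot-delimited
--     token that follows a '.' in one scan, then take the first table code
--     present among them (table order keeps A's priority)."""
--     lang_codes = {
--         'chs': 'chs',
--         'cht': 'cht',
--         'eng': 'en',
--         'jpn': 'ja',
--         'kor': 'ko',
--         'zh': 'chs',
--         'en': 'en',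
--         'ja': 'ja',
--         'ko': 'ko',
--     }
--     parts = set()
--     cur = []
--     seen_dot = False
--     for ch in filename.lower():
--         if ch == '.':
--             if seen_dot:
--                 parts.add(''.join(cur))
--             seen_dot = True
--             cur = []
--         else:
--             cur.append(ch)
--     if seen_dot:
--         parts.add(''.join(cur))
--     for code, lang in lang_codes.items():
--         if code in parts:
--             return lang
--     return 'unknown'
-- ===== Notes on version B (the rewrite author's own statement) =====
-- stated objective: alternative
-- what changed: B tokenizes the lowered filename once in a single scan (collecting every dot-delimited token that follows a dot into a set) and then probes the code table against that set, instead of A's per-code substring scan and endswith test over the whole string.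
import Mathlib
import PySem

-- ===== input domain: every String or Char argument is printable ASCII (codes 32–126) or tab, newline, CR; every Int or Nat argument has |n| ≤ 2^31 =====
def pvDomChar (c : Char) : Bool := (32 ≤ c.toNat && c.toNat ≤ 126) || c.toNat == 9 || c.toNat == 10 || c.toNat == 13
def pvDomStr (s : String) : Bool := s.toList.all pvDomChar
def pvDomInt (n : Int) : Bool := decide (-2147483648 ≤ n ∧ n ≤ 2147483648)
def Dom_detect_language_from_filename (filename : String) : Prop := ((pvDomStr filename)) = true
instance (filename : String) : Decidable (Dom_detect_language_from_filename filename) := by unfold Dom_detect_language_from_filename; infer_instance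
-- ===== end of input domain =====

-- B replaces A's per-code substring/endswith scans by one tokenizing pass over the
-- lowered filename plus set-membership probes of the code table (alternative structure).


-- the dict literal both Pythons carry (insertion order)
def pvLangTable : List (String × String) :=
  [("chs", "chs"), ("cht", "cht"), ("eng", "en"), ("jpn", "ja"), ("kor", "ko"),
   ("zh", "chs"), ("en", "en"), ("ja", "ja"), ("ko", "ko")]

-- ===== PORT A =====
-- the 'for code, lang in lang_codes.items()' loop with its early return
def pvALoop (fl : String) : List (String × String) → String
  | [] => "unknown"
  | (code, lang) :: rest =>
    if PySem.Str.isIn ("." ++ code ++ ".") fl || PySem.Str.endswith fl ("." ++ code) then lang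
    else pvALoop fl rest

def detect_language_from_filename (filename : String) : String :=
  pvALoop (PySem.Str.lower filename) pvLangTable

-- ===== PORT B =====
-- Source B's tokenizing scan: state (seen_dot, cur, parts); a token is added at each
-- dot after the first one and once at the end of the string.
def pvTok : List Char → Bool → List Char → PySem.Set String → PySem.Set String
  | [], seen, cur, parts => if seen then PySem.Set.add parts (String.ofList cur) else parts
  | c :: rest, seen, cur, parts =>
    if c = '.' then
      pvTok rest true [] (if seen then PySem.Set.add parts (String.ofList cur) else parts)
    else
      pvTok rest seen (cur ++ [c]) parts

-- Source B's 'for code, lang in lang_codes.items(): if code in parts'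
def pvBLoop (parts : PySem.Set String) : List (String × String) → String
  | [] => "unknown"
  | (code, lang) :: rest =>
    if PySem.Set.contains parts code then lang else pvBLoop parts rest

def detect_language_from_filename_alt (filename : String) : String :=
  pvBLoop (pvTok (PySem.Str.lower filename).toList false [] PySem.Set.empty) pvLangTable

-- ===== PRECONDITION & SPEC =====
def Spec_detect_language_from_filename (filename : String) (out : String) : Prop := out = detect_language_from_filename_alt filename
instance (filename : String) (out : String) : Decidable (Spec_detect_language_from_filename filename out) := by unfold Spec_detect_language_from_filename; infer_instance

-- ===== CLAIM (what is proved, stated in full; the proofs are below) =====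
def Claim_equal_detect_language_from_filename : Prop := ∀ (filename : String), Dom_detect_language_from_filename filename → Spec_detect_language_from_filename filename (detect_language_from_filename filename)

-- ===== LEMMAS AND PROOFS =====

-- A's per-code condition, on the char-list side
def pvMid (code s : List Char) : Prop :=
  ('.' :: (code ++ ['.'])) <:+: s ∨ ('.' :: code) <:+ s

-- a dot-free token read off the front: takeWhile (· != '.') = code iff the string
-- is code followed by a dot, or exactly code
theorem pv_takeWhile_eq (code : List Char) (h : '.' ∉ code) :
    ∀ (s : List Char), (s.takeWhile (fun c => c != '.') = code ↔ (code ++ ['.'] <+: s ∨ s = code)) := by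
  induction code with
  | nil =>
    intro s
    cases s with
    | nil => simp
    | cons c t =>
      by_cases hc : c = '.'
      · subst hc; simp [List.cons_prefix_cons]
      · simp [hc, List.cons_prefix_cons]
        intro h'; exact absurd h'.symm hc
  | cons a code' ih =>
    intro s
    have ha : a ≠ '.' := fun he => h (he ▸ List.mem_cons_self)
    have h' : '.' ∉ code' := fun hm => h (List.mem_cons_of_mem _ hm)
    cases s with
    | nil => simp
    | cons c t =>
      by_cases hc : c = '.'
      · subst hc
        constructor
        · intro he; simp at he
        · rintro (hp | he)
          · rcases List.cons_prefix_cons.mp (by simpa using hp) with ⟨h1, -⟩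
            exact absurd h1 ha
          · injection he.symm with h1 _
            exact absurd h1 ha
      · simp only [List.takeWhile_cons, bne_iff_ne, ne_eq, hc, not_false_eq_true, if_pos,
          List.cons_append, List.cons_prefix_cons, List.cons.injEq]
        rw [ih h' t]
        constructor
        · rintro ⟨rfl, htw⟩
          rcases htw with hp | rfl
          · exact Or.inl ⟨rfl, hp⟩
          · exact Or.inr ⟨rfl, rfl⟩
        · rintro (⟨rfl, hp⟩ | ⟨rfl, rfl⟩)
          · exact ⟨rfl, Or.inl hp⟩
          · exact ⟨rfl, Or.inr rfl⟩

-- pvMid over a leading dot peels off either the front token or recurses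
theorem pv_mid_cons_dot (code : List Char) (h : '.' ∉ code) (rest : List Char) :
    pvMid code ('.' :: rest) ↔ (rest.takeWhile (fun c => c != '.') = code) ∨ pvMid code rest := by
  unfold pvMid
  rw [List.infix_cons_iff, List.suffix_cons_iff, pv_takeWhile_eq code h rest]
  simp only [List.cons_prefix_cons, List.cons.injEq, true_and]
  constructor
  · rintro ((hp | hi) | (he | hs))
    · exact Or.inl (Or.inl hp)
    · exact Or.inr (Or.inl hi)
    · exact Or.inl (Or.inr he.symm)
    · exact Or.inr (Or.inr hs)
  · rintro ((hp | he) | hi | hs)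
    · exact Or.inl (Or.inl hp)
    · exact Or.inr (Or.inl he.symm)
    · exact Or.inl (Or.inr hi)
    · exact Or.inr (Or.inr hs)

theorem pv_mid_cons_ne (code : List Char) (c : Char) (hc : ¬ c = '.') (rest : List Char) :
    pvMid code (c :: rest) ↔ pvMid code rest := by
  have hcd : ('.' : Char) ≠ c := fun e => hc e.symm
  unfold pvMid
  rw [List.infix_cons_iff, List.suffix_cons_iff]
  simp only [List.cons_prefix_cons, List.cons.injEq]
  constructor
  · rintro ((⟨he, _⟩ | hi) | (⟨he, _⟩ | hs))
    · exact absurd he hcd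
    · exact Or.inl hi
    · exact absurd he hcd
    · exact Or.inr hs
  · rintro (hi | hs)
    · exact Or.inl (Or.inr hi)
    · exact Or.inr (Or.inr hs)

-- the tokenizer invariant: membership in the accumulated set
theorem pv_tok_mem (code : List Char) (h : '.' ∉ code) :
    ∀ (s : List Char) (seen : Bool) (cur : List Char) (parts : PySem.Set String),
      (String.ofList code ∈ pvTok s seen cur parts ↔
        String.ofList code ∈ parts ∨ (seen = true ∧ cur ++ s.takeWhile (fun c => c != '.') = code) ∨ pvMid code s) := by
  intro s
  induction s with
  | nil =>
    intro seen cur parts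
    have hmid : ¬ pvMid code [] := by
      rintro (hi | hs)
      · simpa using hi.length_le
      · simpa using hs.length_le
    cases seen <;>
      simp [pvTok, PySem.Set.mem_add, String.ofList_inj, hmid, eq_comm]
  | cons c rest ih =>
    intro seen cur parts
    by_cases hc : c = '.'
    · subst hc
      rw [pvTok, if_pos rfl, ih, pv_mid_cons_dot code h rest]
      cases seen <;>
        simp [PySem.Set.mem_add, String.ofList_inj, eq_comm]
      tauto
    · rw [pvTok, if_neg hc, ih, pv_mid_cons_ne code c hc rest]
      simp [hc, List.append_assoc]

-- A's per-code test equals B's set membership, for a dot-free code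
theorem pv_cond_eq (code : String) (h : '.' ∉ code.toList) (fl : String) :
    (PySem.Str.isIn ("." ++ code ++ ".") fl || PySem.Str.endswith fl ("." ++ code)) =
      PySem.Set.contains (pvTok fl.toList false [] PySem.Set.empty) code := by
  have hm := pv_tok_mem code.toList h fl.toList false [] PySem.Set.empty
  rw [String.ofList_toList] at hm
  by_cases hmid : pvMid code.toList fl.toList
  · have hmem : code ∈ pvTok fl.toList false [] PySem.Set.empty := by
      rw [hm]; exact Or.inr (Or.inr hmid)
    rw [(PySem.Set.contains_iff _ _).mpr hmem]
    rcases hmid with hi | hs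
    · have h1 : PySem.Str.isIn ("." ++ code ++ ".") fl = true := by
        rw [PySem.Str.isIn_iff_infix]
        simpa [List.append_assoc] using hi
      rw [h1, Bool.true_or]
    · have h2 : PySem.Str.endswith fl ("." ++ code) = true := by
        rw [PySem.Str.endswith_eq, PySem.Chars.endswith_iff]
        simpa using hs
      rw [h2, Bool.or_true]
  · have hmem : code ∉ pvTok fl.toList false [] PySem.Set.empty := by
      rw [hm]; simpa [PySem.Set.empty] using hmid
    have hcont : PySem.Set.contains (pvTok fl.toList false [] PySem.Set.empty) code = false := by
      cases hco : PySem.Set.contains (pvTok fl.toList false [] PySem.Set.empty) code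
      · rfl
      · exact absurd ((PySem.Set.contains_iff _ _).mp hco) hmem
    rw [hcont]
    have h1 : PySem.Str.isIn ("." ++ code ++ ".") fl = false := by
      cases h1 : PySem.Str.isIn ("." ++ code ++ ".") fl
      · rfl
      · exact absurd (Or.inl (by simpa [List.append_assoc] using (PySem.Str.isIn_iff_infix _ _).mp h1)) hmid
    have h2 : PySem.Str.endswith fl ("." ++ code) = false := by
      cases h2 : PySem.Str.endswith fl ("." ++ code)
      · rfl
      · exfalso
        apply hmid
        rw [PySem.Str.endswith_eq, PySem.Chars.endswith_iff] at h2
        exact Or.inr (by simpa using h2)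
    rw [h1, h2]
    rfl

theorem pv_loop_eq (fl : String) :
    ∀ (table : List (String × String)), (∀ p ∈ table, '.' ∉ p.1.toList) →
      pvALoop fl table = pvBLoop (pvTok fl.toList false [] PySem.Set.empty) table := by
  intro table
  induction table with
  | nil => intro _; rfl
  | cons p rest ih =>
    intro hall
    obtain ⟨code, lang⟩ := p
    have hcode : '.' ∉ code.toList := hall _ List.mem_cons_self
    rw [pvALoop, pvBLoop, pv_cond_eq code hcode fl]
    split
    · rfl
    · exact ih (fun q hq => hall q (List.mem_cons_of_mem _ hq))

-- ===== VERDICT (by name: the statement is the Claim_ definition above) =====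
theorem detect_language_from_filename_spec : Claim_equal_detect_language_from_filename := by
  intro filename _
  unfold Spec_detect_language_from_filename detect_language_from_filename detect_language_from_filename_alt
  exact pv_loop_eq (PySem.Str.lower filename) pvLangTable (by decide)
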